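-- pv_equiv track=rewrite | github.com/soodal5629/codingTestProblemSolve | 2 x n 타일링.py | solution
-- ===== SOURCE A (Python) =====
-- def solution(n):
--     answer = 0
--     d = [0] * (n+1)
--     d[1] = 1
--     if n>=2:
--         d[2] = 2
--         for i in range(3, n+1):
--             d[i] = (d[i-1]+ d[i-2]) % 1000000007
--         answer = d[n]
--     return answer
-- ===== SOURCE B (Python) =====
-- def solution(n):
--     # fast-doubling Fibonacci mod 1e9+7: number of 2xn tilings = Fib(n+1)
--     M = 1000000007
--
--     def fib(k):
--         # returns (F(k) % M, F(k+1) % M) by fast doubling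
--         if k == 0:
--             return (0, 1)
--         a, b = fib(k >> 1)
--         c = a * (2 * b - a) % M
--         d = (a * a + b * b) % M
--         if k & 1:
--             return (d, (c + d) % M)
--         return (c, d)
--
--     return fib(n + 1)[0]
-- ===== Notes on version B (the rewrite author's own statement) =====
-- stated objective: faster
-- what changed: Replaced the O(n) DP-array loop with O(log n) fast-doubling Fibonacci modulo 1e9+7.
-- intended difference: On n = 1 A returns 0 because its answer variable is never reassigned for so small an n, while the tiling count of a single column is 1, which B returns. — e.g. on solution(1): A returns 0, B returns 1
-- outside the precondition, e.g. on solution(0): A raises IndexError, B returns 1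
import Mathlib
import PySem

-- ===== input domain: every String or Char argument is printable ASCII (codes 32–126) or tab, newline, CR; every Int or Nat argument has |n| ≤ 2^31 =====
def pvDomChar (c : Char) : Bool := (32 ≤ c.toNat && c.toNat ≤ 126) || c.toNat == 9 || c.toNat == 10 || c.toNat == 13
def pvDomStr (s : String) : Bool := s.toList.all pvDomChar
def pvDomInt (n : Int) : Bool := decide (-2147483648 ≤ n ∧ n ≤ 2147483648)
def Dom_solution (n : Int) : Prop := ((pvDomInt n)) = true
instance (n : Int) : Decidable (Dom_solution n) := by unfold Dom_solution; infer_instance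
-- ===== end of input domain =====

-- B replaces A's O(n) DP array with fast-doubling Fibonacci mod 1e9+7 (asymptotically faster);
-- on n = 1 A returns 0 (answer only set in the n>=2 branch) while B returns the intended count 1.


-- ===== PORT A =====
-- the `for i in range(3, n+1)` loop: one step sets d[i] and moves to i+1; fuel = number of iterations
def solLoop (d : List Int) (i fuel : Nat) : List Int :=
  match fuel with
  | 0 => d
  | fuel' + 1 =>
      solLoop (d.set i ((d.getD (i-1) 0 + d.getD (i-2) 0) % 1000000007)) (i+1) fuel'

def solution (n : Int) : Int :=
  let answer : Int := 0
  let d := List.replicate (n+1).toNat (0 : Int)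
  let d := d.set 1 1          -- d[1] = 1 (in range on every input Pre_ admits)
  if n ≥ 2 then
    let d := d.set 2 2
    let d := solLoop d 3 ((n+1).toNat - 3)
    d.getD n.toNat 0          -- answer = d[n]
  else answer

-- ===== PORT B =====
-- fast doubling: fib(k) of Source B returns (F(k), F(k+1)) mod 1e9+7, recursing on k >> 1.
-- first argument is fuel (kept ≥ k; the recursion in Source B is on the binary length of k):
def fibPairF : Nat → Nat → Int × Int
  | _, 0 => (0, 1)
  | 0, _ + 1 => (0, 1)        -- unreachable while fuel ≥ k (totality guard only)
  | f + 1, k + 1 =>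
      let p := fibPairF f ((k+1) / 2)
      let a := p.1
      let b := p.2
      let c := a * (2*b - a) % 1000000007
      let d := (a*a + b*b) % 1000000007
      if (k+1) % 2 = 1 then (d, (c + d) % 1000000007) else (c, d)

def solution_alt (n : Int) : Int := (fibPairF (n+1).toNat (n+1).toNat).1

-- ===== PRECONDITION & SPEC =====
-- Pre_ excludes exactly n ≤ 0, on which A raises IndexError (d[1] = 1 on a list of length ≤ 1).
def Pre_solution (n : Int) : Prop := 1 ≤ n
instance (n : Int) : Decidable (Pre_solution n) := by unfold Pre_solution; infer_instance
def pvWitness_solution : Int := 5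

-- On n = 1 A returns 0 because its answer variable is never reassigned for so small an n,
-- while the tiling count of a single column is 1, which B returns.
def D_solution (n : Int) : Prop := n = 1
instance (n : Int) : Decidable (D_solution n) := by unfold D_solution; infer_instance
def Spec_solution (n : Int) (out : Int) : Prop := ¬ D_solution n → out = solution_alt n
instance (n : Int) (out : Int) : Decidable (Spec_solution n out) := by unfold Spec_solution; infer_instance
def pvDiffWitness_solution : Int := 1
def pvDiffWitnessOut_solution : Int × Int := (0, 1)

-- ===== CLAIM (what is proved, stated in full; the proofs are below) =====
def Claim_unchanged_solution : Prop := ∀ (n : Int), Dom_solution n → Pre_solution n → Spec_solution n (solution n)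
def Claim_changed_solution : Prop := Dom_solution (pvDiffWitness_solution) ∧ Pre_solution (pvDiffWitness_solution) ∧ D_solution (pvDiffWitness_solution) ∧ solution (pvDiffWitness_solution) = pvDiffWitnessOut_solution.1 ∧ solution_alt (pvDiffWitness_solution) = pvDiffWitnessOut_solution.2 ∧ pvDiffWitnessOut_solution.1 ≠ pvDiffWitnessOut_solution.2
def Claim_exact_solution : Prop := ∀ (n : Int), Dom_solution n → Pre_solution n → D_solution n → solution n ≠ solution_alt n

-- ===== LEMMAS AND PROOFS =====
def fibm (k : Nat) : Int := (Nat.fib k : Int) % 1000000007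

lemma emodeq_self (x : Int) : (x % 1000000007) ≡ x [ZMOD 1000000007] :=
  Int.emod_emod_of_dvd x dvd_rfl

lemma fib_double_cast (j : Nat) :
    ((Nat.fib (2*j) : Int)) = (Nat.fib j : Int) * (2 * Nat.fib (j+1) - Nat.fib j) := by
  have h : Nat.fib j ≤ 2 * Nat.fib (j+1) := le_trans (Nat.fib_le_fib_succ) (by omega)
  rw [Nat.fib_two_mul]; push_cast [h]; ring

-- the three mod-arithmetic facts used by one fast-doubling step
lemma step_c (j : Nat) :
    fibm j * (2 * fibm (j+1) - fibm j) % 1000000007 = fibm (2*j) := by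
  have h := (emodeq_self (Nat.fib j : Int)).mul
    (((emodeq_self (Nat.fib (j+1) : Int)).mul_left 2).sub (emodeq_self (Nat.fib j : Int)))
  unfold fibm
  rw [← fib_double_cast j] at h
  exact h

lemma step_d (j : Nat) :
    (fibm j * fibm j + fibm (j+1) * fibm (j+1)) % 1000000007 = fibm (2*j+1) := by
  have h := ((emodeq_self (Nat.fib j : Int)).mul (emodeq_self (Nat.fib j : Int))).add
    ((emodeq_self (Nat.fib (j+1) : Int)).mul (emodeq_self (Nat.fib (j+1) : Int)))
  unfold fibm
  have e : (Nat.fib (2*j+1) : Int)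
      = (Nat.fib j : Int) * Nat.fib j + (Nat.fib (j+1) : Int) * Nat.fib (j+1) := by
    rw [Nat.fib_two_mul_add_one]; push_cast; ring
  rw [← e] at h
  exact h

lemma step_sum (a b : Nat) :
    (fibm a + fibm b) % 1000000007 = ((Nat.fib a + Nat.fib b : Nat) : Int) % 1000000007 := by
  have h := (emodeq_self (Nat.fib a : Int)).add (emodeq_self (Nat.fib b : Int))
  unfold fibm
  push_cast
  exact h

lemma fibPairF_spec : ∀ (f k : Nat), k ≤ f → fibPairF f k = (fibm k, fibm (k+1)) := by
  intro f
  induction f using Nat.strong_induction_on with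
  | _ f ih =>
    intro k hk
    match f, k with
    | f, 0 => simp [fibPairF]; constructor <;> decide
    | f + 1, k + 1 =>
      have hrec := ih f (by omega) ((k+1)/2) (by omega)
      have hunf : fibPairF (f+1) (k+1) =
          (if (k+1) % 2 = 1
           then ((fibm ((k+1)/2)*fibm ((k+1)/2) + fibm ((k+1)/2+1)*fibm ((k+1)/2+1)) % 1000000007,
                 (fibm ((k+1)/2)*(2*fibm ((k+1)/2+1) - fibm ((k+1)/2)) % 1000000007 +
                  (fibm ((k+1)/2)*fibm ((k+1)/2) + fibm ((k+1)/2+1)*fibm ((k+1)/2+1)) % 1000000007) % 1000000007)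
           else (fibm ((k+1)/2)*(2*fibm ((k+1)/2+1) - fibm ((k+1)/2)) % 1000000007,
                 (fibm ((k+1)/2)*fibm ((k+1)/2) + fibm ((k+1)/2+1)*fibm ((k+1)/2+1)) % 1000000007)) := by
        simp only [fibPairF, hrec]
      rw [hunf]
      set j := (k+1)/2 with hjdef
      by_cases hpar : (k+1) % 2 = 1
      · have hke : k + 1 = 2*j + 1 := by omega
        rw [if_pos hpar, hke]
        refine Prod.ext ?_ ?_
        · simpa using step_d j
        · show (_ + _) % 1000000007 = fibm (2*j+1+1)
          rw [step_c j, step_d j]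
          rw [step_sum (2*j) (2*j+1)]
          unfold fibm
          congr 2
          rw [show 2*j+1+1 = (2*j) + 1 + 1 from rfl, Nat.fib_add_two]
      · have hke : k + 1 = 2*j := by omega
        rw [if_neg hpar, hke]
        refine Prod.ext ?_ ?_
        · simpa using step_c j
        · simpa using step_d j

lemma solLoop_spec : ∀ (fuel : Nat) (d : List Int) (i : Nat), 3 ≤ i → i + fuel ≤ d.length →
    d.getD (i-1) 0 = fibm i → d.getD (i-2) 0 = fibm (i-1) →
    (solLoop d i fuel).getD (i + fuel - 1) 0 = fibm (i + fuel) := by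
  intro fuel
  induction fuel with
  | zero => intro d i _ _ h1 _; simpa using h1
  | succ fuel' ih =>
    intro d i hi hlen h1 h2
    obtain ⟨m, rfl⟩ : ∃ m, i = m + 3 := ⟨i - 3, by omega⟩
    have hv : (d.getD (m+3-1) 0 + d.getD (m+3-2) 0) % 1000000007 = fibm (m+4) := by
      rw [h1, h2]
      rw [show fibm (m+3) + fibm (m+3-1) = fibm (m+3-1) + fibm (m+3) by ring,
          step_sum (m+3-1) (m+3)]
      unfold fibm
      congr 2
      simp only [show m+3-1 = m+2 from rfl, Nat.fib_add_two]
    show (solLoop (d.set (m+3) _) (m+4) fuel').getD _ 0 = _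
    have hres := ih (d.set (m+3) ((d.getD (m+3-1) 0 + d.getD (m+3-2) 0) % 1000000007)) (m+4)
      (by omega) (by simp; omega)
      (by
        show (d.set (m+3) _).getD (m+3) 0 = fibm (m+4)
        rw [List.getD_eq_getElem?_getD, List.getElem?_set_self (by omega)]
        simpa using hv)
      (by
        show (d.set (m+3) _).getD (m+2) 0 = fibm (m+3)
        rw [List.getD_eq_getElem?_getD, List.getElem?_set_ne (by omega)]
        simpa [List.getD_eq_getElem?_getD] using h1)
    have e1 : m + 4 + fuel' - 1 = m + 3 + (fuel' + 1) - 1 := by omega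
    have e2 : m + 4 + fuel' = m + 3 + (fuel' + 1) := by omega
    rw [e1, e2] at hres
    exact hres

-- ===== VERDICT (by name: the statement is the Claim_ definition above) =====
theorem solution_spec : Claim_unchanged_solution := by
  intro n _ hpre hnd
  unfold Pre_solution at hpre
  unfold D_solution at hnd
  have h2 : 2 ≤ n := by omega
  show solution n = solution_alt n
  simp only [solution, solution_alt]
  rw [if_pos (show n ≥ 2 from h2)]
  set N := (n + 1).toNat with hN
  have hN3 : 3 ≤ N := by omega
  have hd1 : (((List.replicate N (0:Int)).set 1 1).set 2 2).getD 2 0 = fibm 3 := by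
    rw [List.getD_eq_getElem?_getD, List.getElem?_set_self (by simp; omega)]
    decide
  have hd2 : (((List.replicate N (0:Int)).set 1 1).set 2 2).getD 1 0 = fibm 2 := by
    rw [List.getD_eq_getElem?_getD, List.getElem?_set_ne (by omega),
        List.getElem?_set_self (by simp; omega)]
    decide
  have hspec := solLoop_spec (N-3) (((List.replicate N (0:Int)).set 1 1).set 2 2) 3
    (le_refl 3) (by simp; omega)
    (by simpa using hd1) (by simpa using hd2)
  rw [show 3 + (N-3) - 1 = N - 1 by omega, show 3 + (N-3) = N by omega] at hspec
  rw [fibPairF_spec N N le_rfl]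
  show _ = fibm N
  rw [show n.toNat = N - 1 by omega]
  exact hspec

theorem solution_changed : Claim_changed_solution := by unfold Claim_changed_solution; decide

theorem solution_tight : Claim_exact_solution := by
  intro n _ _ hd
  unfold D_solution at hd; subst hd
  decide
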